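-- pv_equiv track=rewrite | github.com/paramudya/chka_plates | utils/prep.py | split_sect
-- ===== SOURCE A (Python) =====
-- def split_sect(plate: str):
--     prev_state,section_i='',0
--     splits={}
--     for p in plate+'?':
--         # update current state
--         current_state='digit' if p.isdigit() else 'str'
--
--         # check for new section
--         if prev_state!=current_state or p=='?':
--             if section_i!=0:
--                 splits[section_i]=current_running_string
--             section_i+=1
--             current_running_string=p
--         else:
--             current_running_string+=p
--         # push current back to prev state
--         prev_state=current_state
--     return splits[1], splits[2], splits[3], splits[4]
-- ===== SOURCE B (Python) =====
-- def split_sect(plate: str):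
--     # Two-pointer scan: slice the plate into sections, a new section starting at every
--     # digit/non-digit class change and before every '?' (the rule A implements with its sentinel).
--     secs = []
--     i, n = 0, len(plate)
--     while i < n:
--         d = plate[i].isdigit()
--         j = i + 1
--         while j < n and plate[j] != '?' and plate[j].isdigit() == d:
--             j += 1
--         secs.append(plate[i:j])
--         i = j
--     return secs[0], secs[1], secs[2], secs[3]
-- ===== Notes on version B (the rewrite author's own statement) =====
-- stated objective: alternative
-- what changed: Replaces A's char-by-char state machine (prev-state string, '?' sentinel appended to the input, dict of sections keyed by a running counter) with a two-pointer scan that slices the plate into sections (a section starts at a digit/non-digit change or before a '?') and returns the first four.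
import Mathlib
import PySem

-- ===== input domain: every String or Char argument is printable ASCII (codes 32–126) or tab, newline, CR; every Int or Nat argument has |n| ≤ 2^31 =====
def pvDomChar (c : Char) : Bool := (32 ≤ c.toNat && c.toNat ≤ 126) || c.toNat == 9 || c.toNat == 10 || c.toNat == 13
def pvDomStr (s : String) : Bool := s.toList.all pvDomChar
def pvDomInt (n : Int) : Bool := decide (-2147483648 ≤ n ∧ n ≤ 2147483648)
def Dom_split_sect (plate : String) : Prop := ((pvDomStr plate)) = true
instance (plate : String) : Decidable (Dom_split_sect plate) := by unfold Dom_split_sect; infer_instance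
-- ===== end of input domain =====

-- B replaces A's char-by-char state machine ('?' sentinel appended to the input, prev-state string,
-- dict of sections) with a two-pointer scan slicing the plate into maximal sections (objective: alternative).

-- ===== PORT A =====
-- A's loop state: (prev_state, section_i, splits, current_running_string); sections kept as List Char
-- (Lean's own String concatenation is kernel-opaque; String.ofList is applied at the very end).
def pvStepA (st : String × Int × PySem.Dict Int (List Char) × List Char) (p : Char) :
    String × Int × PySem.Dict Int (List Char) × List Char :=
  let current_state : String := if PySem.Chars.isdigit p then "digit" else "str"
  if st.1 != current_state || p == '?' then
    let splits := if st.2.1 != 0 then st.2.2.1.insert st.2.1 st.2.2.2 else st.2.2.1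
    (current_state, st.2.1 + 1, splits, [p])
  else
    (current_state, st.2.1, st.2.2.1, st.2.2.2 ++ [p])

def split_sect (plate : String) : String × String × String × String :=
  let fin := (plate.toList ++ ['?']).foldl pvStepA ("", 0, PySem.Dict.empty, [])
  let splits := fin.2.2.1
  (String.ofList (splits.getD 1 []), String.ofList (splits.getD 2 []),
   String.ofList (splits.getD 3 []), String.ofList (splits.getD 4 []))

-- ===== PORT B =====
-- pvRunSplit d cs = (longest prefix of cs of non-'?' chars with digit-class d, the rest): B's inner while loop.
def pvRunSplit (d : Bool) : List Char → List Char × List Char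
  | [] => ([], [])
  | c :: cs =>
    if c != '?' && (PySem.Chars.isdigit c == d) then
      let pr := pvRunSplit d cs
      (c :: pr.1, pr.2)
    else ([], c :: cs)

-- B's outer while loop: the list of sections of the plate.
-- (fuel = length of the list, so the recursion is structural and kernel-reducible; it is never exhausted)
def pvRuns : Nat → List Char → List (List Char)
  | 0, _ => []
  | _, [] => []
  | fuel + 1, c :: cs =>
    let pr := pvRunSplit (PySem.Chars.isdigit c) cs
    (c :: pr.1) :: pvRuns fuel pr.2

def split_sect_alt (plate : String) : String × String × String × String :=
  let runs := (pvRuns plate.toList.length plate.toList).map String.ofList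
  (runs.getD 0 "", runs.getD 1 "", runs.getD 2 "", runs.getD 3 "")

-- ===== PRECONDITION & SPEC =====
-- Number of sections, read off the adjacent pairs of the input: a section starts at index 0,
-- at a digit/non-digit class change, and at every '?'.
def pvSecCount (l : List Char) : Nat :=
  match l with
  | [] => 0
  | _ :: cs =>
    1 + (l.zip cs).countP
          (fun q => (PySem.Chars.isdigit q.1 != PySem.Chars.isdigit q.2) || q.2 == '?')

-- Pre_: exactly the inputs on which A returns normally — at least four sections; on fewer,
-- A raises KeyError (and B raises IndexError).
def Pre_split_sect (plate : String) : Prop := 4 ≤ pvSecCount plate.toList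
instance (plate : String) : Decidable (Pre_split_sect plate) := by unfold Pre_split_sect; infer_instance
def pvWitness_split_sect : String := "ab12cd34"

def Spec_split_sect (plate : String) (out : String × String × String × String) : Prop :=
  out = split_sect_alt plate
instance (plate : String) (out : String × String × String × String) : Decidable (Spec_split_sect plate out) := by
  unfold Spec_split_sect; infer_instance

-- ===== CLAIM (what is proved, stated in full; the proofs are below) =====
def Claim_equal_split_sect : Prop :=
  ∀ (plate : String), Dom_split_sect plate → Pre_split_sect plate →
    Spec_split_sect plate (split_sect plate)

-- ===== LEMMAS AND PROOFS =====

theorem pvRunSplit_snd_length_le (d : Bool) (l : List Char) :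
    (pvRunSplit d l).2.length ≤ l.length := by
  induction l with
  | nil => simp [pvRunSplit]
  | cons c cs ih =>
    simp only [pvRunSplit]
    split
    · exact Nat.le_succ_of_le ih
    · simp

theorem pvRunSplit_append (d : Bool) (l : List Char) :
    (pvRunSplit d l).1 ++ (pvRunSplit d l).2 = l := by
  induction l with
  | nil => simp [pvRunSplit]
  | cons c cs ih =>
    simp only [pvRunSplit]
    split
    · simpa using ih
    · simp

theorem pvRunSplit_fst_mem (d : Bool) (l : List Char) :
    ∀ x ∈ (pvRunSplit d l).1, PySem.Chars.isdigit x = d ∧ x ≠ '?' := by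
  induction l with
  | nil => simp [pvRunSplit]
  | cons c cs ih =>
    simp only [pvRunSplit]
    split
    · rename_i h
      rw [Bool.and_eq_true] at h
      intro x hx
      rcases List.mem_cons.mp hx with rfl | hx
      · exact ⟨beq_iff_eq.mp h.2, by simpa using h.1⟩
      · exact ih x hx
    · simp

theorem pvRunSplit_snd_head (d : Bool) (l : List Char) (x : Char) (xs : List Char)
    (h : (pvRunSplit d l).2 = x :: xs) : PySem.Chars.isdigit x = !d ∨ x = '?' := by
  induction l with
  | nil => simp [pvRunSplit] at h
  | cons c cs ih =>
    simp only [pvRunSplit] at h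
    by_cases hc : (c != '?' && (PySem.Chars.isdigit c == d)) = true
    · rw [if_pos hc] at h
      exact ih h
    · rw [if_neg hc] at h
      cases h
      rw [Bool.and_eq_true, not_and_or] at hc
      rcases hc with hc | hc
      · right
        simpa using hc
      · left
        cases d <;> simp_all

-- A's inner loop over the continuation of a section: state unchanged except the running string grows.
theorem pvFoldA_run (r : List Char) (d : Bool) : ∀ (k : Int)
    (spl : PySem.Dict Int (List Char)) (cur : List Char),
    (∀ x ∈ r, PySem.Chars.isdigit x = d ∧ x ≠ '?') →
    List.foldl pvStepA ((if d then "digit" else "str"), k, spl, cur) r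
      = ((if d then "digit" else "str"), k, spl, cur ++ r) := by
  induction r with
  | nil => simp
  | cons x r' ih =>
    intro k spl cur hall
    obtain ⟨hx, hxq⟩ := hall x List.mem_cons_self
    have hstep : pvStepA ((if d then "digit" else "str"), k, spl, cur) x
        = ((if d then "digit" else "str"), k, spl, cur ++ [x]) := by
      simp [pvStepA, hx, hxq]
    rw [List.foldl_cons, hstep, ih k spl (cur ++ [x]) (fun y hy => hall y (List.mem_cons_of_mem _ hy))]
    simp

-- proof-side helper: the dict A builds, as "insert the sections at keys k, k+1, …".
def pvInsRuns : PySem.Dict Int (List Char) → Int → List (List Char) → PySem.Dict Int (List Char)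
  | spl, _, [] => spl
  | spl, k, r :: rs => pvInsRuns (spl.insert k r) (k + 1) rs

theorem pvInsRuns_getD_lt (rs : List (List Char)) : ∀ (spl : PySem.Dict Int (List Char)) (k j : Int),
    j < k → (pvInsRuns spl k rs).getD j [] = spl.getD j [] := by
  induction rs with
  | nil => intro spl k j _; rfl
  | cons r rs' ih =>
    intro spl k j hj
    simp only [pvInsRuns]
    rw [ih (spl.insert k r) (k + 1) j (by omega)]
    exact PySem.Dict.getD_insert_of_ne _ _ _ (by omega)

theorem pvInsRuns_getD (rs : List (List Char)) : ∀ (spl : PySem.Dict Int (List Char)) (k : Int)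
    (i : Nat), i < rs.length →
    (pvInsRuns spl k rs).getD (k + (i : Int)) [] = rs.getD i [] := by
  induction rs with
  | nil => intro spl k i h; simp at h
  | cons r rs' ih =>
    intro spl k i hi
    cases i with
    | zero =>
      simp only [pvInsRuns]
      rw [show k + ((0 : Nat) : Int) = k by omega]
      rw [pvInsRuns_getD_lt rs' (spl.insert k r) (k + 1) k (by omega)]
      simp [PySem.Dict.getD_insert_self]
    | succ i' =>
      simp only [pvInsRuns]
      rw [show k + ((i' + 1 : Nat) : Int) = (k + 1) + (i' : Int) by push_cast; ring]
      rw [ih (spl.insert k r) (k + 1) i' (by simpa using hi)]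
      simp

theorem pvClsNe (b : Bool) :
    ((if b then "digit" else "str" : String) != (if !b then "digit" else "str")) = true := by
  cases b <;> decide

theorem pvFoldA_q (prev : String) (k : Int) (spl : PySem.Dict Int (List Char)) (cur : List Char) :
    List.foldl pvStepA (prev, k, spl, cur) ['?']
      = ("str", k + 1, (if k = 0 then spl else spl.insert k cur), ['?']) := by
  by_cases hk0 : k = 0 <;>
    simp [pvStepA, hk0, show PySem.Chars.isdigit '?' = false from by decide]

-- A's whole loop computes exactly B's sections, keyed from k+1 on.
theorem pvFoldA_main : ∀ (fuel : Nat) (l : List Char), l.length ≤ fuel →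
    ∀ (prev : String) (k : Int) (spl : PySem.Dict Int (List Char)) (cur : List Char), 0 ≤ k →
    (∀ c cs, l = c :: cs →
      ((prev != (if PySem.Chars.isdigit c then "digit" else "str")) || (c == '?')) = true) →
    List.foldl pvStepA (prev, k, spl, cur) (l ++ ['?'])
      = ("str", k + ((pvRuns fuel l).length : Int) + 1,
         pvInsRuns (if k = 0 then spl else spl.insert k cur) (k + 1) (pvRuns fuel l), ['?']) := by
  intro fuel
  induction fuel with
  | zero =>
    intro l hl prev k spl cur _ _
    have hln : l = [] := List.length_eq_zero_iff.mp (Nat.le_zero.mp hl)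
    subst hln
    rw [List.nil_append, pvFoldA_q]
    simp [pvRuns, pvInsRuns]
  | succ f ih =>
    intro l hl prev k spl cur hk hc
    cases l with
    | nil =>
      rw [List.nil_append, pvFoldA_q]
      simp [pvRuns, pvInsRuns]
    | cons c cs =>
      have hcs : cs.length ≤ f := by simpa using hl
      have happ := pvRunSplit_append (PySem.Chars.isdigit c) cs
      have hlist : cs ++ ['?'] = (pvRunSplit (PySem.Chars.isdigit c) cs).1
          ++ ((pvRunSplit (PySem.Chars.isdigit c) cs).2 ++ ['?']) := by
        rw [← List.append_assoc, happ]
      have hcnd := hc c cs rfl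
      have hstep : pvStepA (prev, k, spl, cur) c
          = ((if PySem.Chars.isdigit c then "digit" else "str"), k + 1,
             (if k = 0 then spl else spl.insert k cur), [c]) := by
        by_cases hk0 : k = 0 <;> simp [pvStepA, hcnd, hk0]
      have hrun := pvRunSplit_fst_mem (PySem.Chars.isdigit c) cs
      have hlen2 : (pvRunSplit (PySem.Chars.isdigit c) cs).2.length ≤ f :=
        le_trans (pvRunSplit_snd_length_le _ cs) hcs
      have hc2 : ∀ x xs, (pvRunSplit (PySem.Chars.isdigit c) cs).2 = x :: xs →
          ((((if PySem.Chars.isdigit c then "digit" else "str") : String)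
            != (if PySem.Chars.isdigit x then "digit" else "str")) || (x == '?')) = true := by
        intro x xs hx
        rcases pvRunSplit_snd_head _ cs x xs hx with hdx | hdx
        · rw [hdx, Bool.or_eq_true]
          exact Or.inl (pvClsNe _)
        · subst hdx
          simp
      calc List.foldl pvStepA (prev, k, spl, cur) ((c :: cs) ++ ['?'])
          = List.foldl pvStepA
              ((if PySem.Chars.isdigit c then "digit" else "str"), k + 1,
               (if k = 0 then spl else spl.insert k cur), [c])
              ((pvRunSplit (PySem.Chars.isdigit c) cs).1
                ++ ((pvRunSplit (PySem.Chars.isdigit c) cs).2 ++ ['?'])) := by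
            rw [List.cons_append, List.foldl_cons, hstep, hlist]
        _ = List.foldl pvStepA
              ((if PySem.Chars.isdigit c then "digit" else "str"), k + 1,
               (if k = 0 then spl else spl.insert k cur),
               c :: (pvRunSplit (PySem.Chars.isdigit c) cs).1)
              ((pvRunSplit (PySem.Chars.isdigit c) cs).2 ++ ['?']) := by
            rw [List.foldl_append, pvFoldA_run _ _ _ _ _ hrun]
            rfl
        _ = ("str", (k + 1) + ((pvRuns f (pvRunSplit (PySem.Chars.isdigit c) cs).2).length : Int) + 1,
             pvInsRuns ((if k = 0 then spl else spl.insert k cur).insert (k + 1)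
                 (c :: (pvRunSplit (PySem.Chars.isdigit c) cs).1)) ((k + 1) + 1)
               (pvRuns f (pvRunSplit (PySem.Chars.isdigit c) cs).2), ['?']) := by
            rw [ih _ hlen2 _ (k + 1) _ _ (by omega) hc2]
            rw [if_neg (by omega : ¬ (k + 1 = 0))]
        _ = ("str", k + ((pvRuns (f + 1) (c :: cs)).length : Int) + 1,
             pvInsRuns (if k = 0 then spl else spl.insert k cur) (k + 1)
               (pvRuns (f + 1) (c :: cs)), ['?']) := by
            simp only [pvRuns, pvInsRuns, List.length_cons]
            refine congrArg (fun z : Int => ("str", z,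
              pvInsRuns ((if k = 0 then spl else spl.insert k cur).insert (k + 1)
                (c :: (pvRunSplit (PySem.Chars.isdigit c) cs).1)) (k + 1 + 1)
                (pvRuns f (pvRunSplit (PySem.Chars.isdigit c) cs).2), (['?'] : List Char))) ?_
            push_cast
            ring

-- The section count read off adjacent pairs matches the number of sections B produces.
theorem pvPairs_run : ∀ (r : List Char) (c : Char) (rest : List Char) (d : Bool),
    PySem.Chars.isdigit c = d → (∀ x ∈ r, PySem.Chars.isdigit x = d ∧ x ≠ '?') →
    (∀ x xs, rest = x :: xs → PySem.Chars.isdigit x = !d ∨ x = '?') →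
    ((c :: (r ++ rest)).zip (r ++ rest)).countP
        (fun q => (PySem.Chars.isdigit q.1 != PySem.Chars.isdigit q.2) || q.2 == '?')
      = (if rest.isEmpty then 0 else 1)
        + (rest.zip rest.tail).countP
            (fun q => (PySem.Chars.isdigit q.1 != PySem.Chars.isdigit q.2) || q.2 == '?') := by
  intro r
  induction r with
  | nil =>
    intro c rest d hc _ hrest
    cases rest with
    | nil => simp
    | cons x xs =>
      simp only [List.nil_append, List.zip, List.zipWith_cons_cons, List.countP_cons, List.tail_cons]
      have : ((PySem.Chars.isdigit c != PySem.Chars.isdigit x) || x == '?') = true := by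
        rcases hrest x xs rfl with hdx | hdx
        · rw [hc, hdx, Bool.or_eq_true]
          exact Or.inl (by cases d <;> rfl)
        · subst hdx; simp
      simp [this]
      omega
  | cons y r' ih =>
    intro c rest d hc hall hrest
    obtain ⟨hy, hyq⟩ := hall y List.mem_cons_self
    simp only [List.cons_append, List.zip, List.zipWith_cons_cons, List.countP_cons]
    have : ((PySem.Chars.isdigit c != PySem.Chars.isdigit y) || y == '?') = false := by
      rw [hc, hy]
      simp [hyq]
    simp only [this, Bool.false_eq_true, if_false]
    have := ih y rest d hy (fun x hx => hall x (List.mem_cons_of_mem _ hx)) hrest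
    simp only [List.zip] at this ⊢
    omega

theorem pvSecCount_runs : ∀ (fuel : Nat) (l : List Char), l.length ≤ fuel →
    pvSecCount l = (pvRuns fuel l).length := by
  intro fuel
  induction fuel with
  | zero =>
    intro l hl
    have : l = [] := List.length_eq_zero_iff.mp (Nat.le_zero.mp hl)
    subst this; rfl
  | succ f ih =>
    intro l hl
    cases l with
    | nil => rfl
    | cons c cs =>
      have hcs : cs.length ≤ f := by simpa using hl
      have happ := pvRunSplit_append (PySem.Chars.isdigit c) cs
      have hcount : pvSecCount (c :: cs)
          = 1 + ((c :: ((pvRunSplit (PySem.Chars.isdigit c) cs).1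
                  ++ (pvRunSplit (PySem.Chars.isdigit c) cs).2)).zip
                 ((pvRunSplit (PySem.Chars.isdigit c) cs).1
                  ++ (pvRunSplit (PySem.Chars.isdigit c) cs).2)).countP
              (fun q => (PySem.Chars.isdigit q.1 != PySem.Chars.isdigit q.2) || q.2 == '?') := by
        rw [happ]; rfl
      rw [hcount]
      rw [pvPairs_run _ c _ (PySem.Chars.isdigit c) rfl
            (pvRunSplit_fst_mem _ cs) (fun x xs hx => pvRunSplit_snd_head _ cs x xs hx)]
      simp only [pvRuns, List.length_cons]
      cases hrest : (pvRunSplit (PySem.Chars.isdigit c) cs).2 with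
      | nil => cases f <;> rfl
      | cons x xs =>
        have hr := ih (x :: xs) (by
          have := pvRunSplit_snd_length_le (PySem.Chars.isdigit c) cs
          rw [hrest] at this
          omega)
        have hrc : pvSecCount (x :: xs)
            = 1 + ((x :: xs).zip xs).countP
                (fun q => (PySem.Chars.isdigit q.1 != PySem.Chars.isdigit q.2) || q.2 == '?') := rfl
        rw [hrc] at hr
        simp only [List.isEmpty_cons, List.tail_cons, Bool.false_eq_true, if_false]
        omega
-- ===== VERDICT (by name: the statement is the Claim_ definition above) =====
theorem split_sect_spec : Claim_equal_split_sect := by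
  intro plate _ hpre
  unfold Pre_split_sect at hpre
  show split_sect plate = split_sect_alt plate
  simp only [split_sect, split_sect_alt]
  cases hL : plate.toList with
  | nil => rw [hL] at hpre; simp [pvSecCount] at hpre
  | cons c cs =>
    rw [hL] at hpre
    have hc0 : ∀ c' cs', (c :: cs) = c' :: cs' →
        (((("" : String)) != (if PySem.Chars.isdigit c' then "digit" else "str")) || (c' == '?')) = true := by
      intro c' cs' h
      cases h
      rw [Bool.or_eq_true]
      exact Or.inl (by cases hd : PySem.Chars.isdigit c <;> decide)
    have hmain := pvFoldA_main (c :: cs).length (c :: cs) le_rfl "" 0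
      PySem.Dict.empty [] le_rfl hc0
    have hrs : 4 ≤ (pvRuns (c :: cs).length (c :: cs)).length := by
      rw [← pvSecCount_runs _ _ le_rfl]; exact hpre
    have hg : ∀ i : Nat, i < (pvRuns (c :: cs).length (c :: cs)).length →
        (pvInsRuns PySem.Dict.empty 1 (pvRuns (c :: cs).length (c :: cs))).getD (1 + (i : Int)) []
          = (pvRuns (c :: cs).length (c :: cs)).getD i [] :=
      fun i h => pvInsRuns_getD _ _ 1 i h
    have g1 := hg 0 (by omega); have g2 := hg 1 (by omega)
    have g3 := hg 2 (by omega); have g4 := hg 3 (by omega)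
    norm_num at g1 g2 g3 g4
    rw [hmain]
    norm_num
    exact ⟨congrArg _ g1, congrArg _ g2, congrArg _ g3, congrArg _ g4⟩
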